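-- pv_equiv track=rewrite | github.com/larynx95/rosalind | src/ba04/ba04f_cscore/ba04f.py | cyclo_spectrum_ints
-- ===== SOURCE A (Python) =====
-- def cyclo_spectrum_ints(ipeptide):
--     """
--     [int] -> [int]
--     returns a cyclo-spectrum from a list of single amino acid masses
--     >>> cyclo_spectrum_ints([113,128,186])
--         [0,113,128,186,241,299,314,427]
--     """
--     prefix_mass = [0]
--     for mass in ipeptide:
--         prefix_mass.append(prefix_mass[-1] + mass)
--     cspectrum = [0]
--     peptide_mass = prefix_mass[-1]
--     for i in range(len(ipeptide)):
--         for j in range(i+1, len(ipeptide)+1):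
--             cspectrum.append(prefix_mass[j] - prefix_mass[i])
--             if i > 0 and j < len(ipeptide):
--                 cspectrum.append(peptide_mass - (prefix_mass[j] - prefix_mass[i]))
--     return sorted(cspectrum)
-- ===== SOURCE B (Python) =====
-- def cyclo_spectrum_ints(ipeptide):
--     """Enumerate cyclic subpeptides by wrapping over a doubled list (length-major),
--     using prefix sums over the doubled list, instead of complementing interior windows."""
--     n = len(ipeptide)
--     ext = ipeptide + ipeptide
--     pre = [0]
--     for mass in ext:
--         pre.append(pre[-1] + mass)
--     spectrum = [0]
--     for L in range(1, n):
--         for i in range(n):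
--             spectrum.append(pre[i+L] - pre[i])
--     if ipeptide:
--         spectrum.append(pre[n])
--     return sorted(spectrum)
-- ===== Notes on version B (the rewrite author's own statement) =====
-- stated objective: alternative
-- what changed: B enumerates the cyclic subpeptides directly, length-major, as wrap-around windows of a doubled list (via prefix sums over the doubled list), instead of A's start-major triangle of linear windows plus a peptide-mass complement for each interior window.
import Mathlib
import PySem

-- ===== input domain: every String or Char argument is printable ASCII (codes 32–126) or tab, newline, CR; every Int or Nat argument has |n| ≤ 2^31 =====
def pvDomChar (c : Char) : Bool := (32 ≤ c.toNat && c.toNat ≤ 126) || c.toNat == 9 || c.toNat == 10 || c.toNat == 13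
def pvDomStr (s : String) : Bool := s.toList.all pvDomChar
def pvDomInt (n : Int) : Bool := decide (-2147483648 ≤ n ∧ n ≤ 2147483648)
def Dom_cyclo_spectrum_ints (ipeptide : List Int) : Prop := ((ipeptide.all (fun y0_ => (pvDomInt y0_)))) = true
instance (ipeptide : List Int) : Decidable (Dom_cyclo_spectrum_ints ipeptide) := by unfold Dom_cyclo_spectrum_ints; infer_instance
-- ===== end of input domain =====

-- B enumerates the cyclic subpeptides directly (length-major, wrapping over a doubled
-- list) instead of A's complement trick on interior prefix-sum windows; objective: alternative.

-- ===== PORT A =====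
def cyclo_spectrum_ints (ipeptide : List Int) : List Int :=
  let prefix_mass := ipeptide.foldl (fun pm mass => pm ++ [PySem.List.pyGetD pm (-1) 0 + mass]) [0]
  let cspectrum : List Int := [0]
  let peptide_mass := PySem.List.pyGetD prefix_mass (-1) 0
  let cspectrum := (PySem.List.pyRange 0 (ipeptide.length : Int) 1).foldl (fun cs i =>
    (PySem.List.pyRange (i+1) ((ipeptide.length : Int)+1) 1).foldl (fun cs j =>
      let cs := cs ++ [PySem.List.pyGetD prefix_mass j 0 - PySem.List.pyGetD prefix_mass i 0]
      if 0 < i ∧ j < (ipeptide.length : Int) then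
        cs ++ [peptide_mass - (PySem.List.pyGetD prefix_mass j 0 - PySem.List.pyGetD prefix_mass i 0)]
      else cs) cs) cspectrum
  PySem.List.sorted cspectrum (fun x => x) false

-- ===== PORT B =====
def cyclo_spectrum_ints_alt (ipeptide : List Int) : List Int :=
  let n : Int := ipeptide.length
  let ext := ipeptide ++ ipeptide
  let pre := ext.foldl (fun pm mass => pm ++ [PySem.List.pyGetD pm (-1) 0 + mass]) [0]
  let spectrum : List Int := [0]
  let spectrum := (PySem.List.pyRange 1 n 1).foldl (fun sp L =>
    (PySem.List.pyRange 0 n 1).foldl (fun sp i =>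
      sp ++ [PySem.List.pyGetD pre (i+L) 0 - PySem.List.pyGetD pre i 0]) sp) spectrum
  let spectrum := if ipeptide ≠ [] then spectrum ++ [PySem.List.pyGetD pre n 0] else spectrum
  PySem.List.sorted spectrum (fun x => x) false

-- ===== PRECONDITION & SPEC =====
def Spec_cyclo_spectrum_ints (ipeptide : List Int) (out : List Int) : Prop := out = cyclo_spectrum_ints_alt ipeptide
instance (ipeptide : List Int) (out : List Int) : Decidable (Spec_cyclo_spectrum_ints ipeptide out) := by unfold Spec_cyclo_spectrum_ints; infer_instance

-- ===== CLAIM (what is proved, stated in full; the proofs are below) =====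
def Claim_equal_cyclo_spectrum_ints : Prop := ∀ (ipeptide : List Int), Dom_cyclo_spectrum_ints ipeptide → Spec_cyclo_spectrum_ints ipeptide (cyclo_spectrum_ints ipeptide)

-- ===== LEMMAS AND PROOFS =====

-- mass of the linear window a[i:j], via prefix sums (Int indices)
def pvW (a : List Int) (i j : Int) : Int := (a.take j.toNat).sum - (a.take i.toNat).sum

-- the raw (unsorted) list A builds
def pvLA (a : List Int) : List Int :=
  [0] ++ (PySem.List.pyRange 0 (a.length : Int) 1).flatMap (fun i =>
    (PySem.List.pyRange (i+1) ((a.length : Int)+1) 1).flatMap (fun j =>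
      if 0 < i ∧ j < (a.length : Int) then [pvW a i j, a.sum - pvW a i j] else [pvW a i j]))

-- the raw (unsorted) list B builds
def pvLB (a : List Int) : List Int :=
  ([0] ++ (PySem.List.pyRange 1 (a.length : Int) 1).flatMap (fun L =>
    (PySem.List.pyRange 0 (a.length : Int) 1).map (fun i =>
      (PySem.List.slice (a ++ a) (some i) (some (i+L))).sum)))
  ++ (if a ≠ [] then [a.sum] else [])

lemma pv_prefix_char (a : List Int) :
    a.foldl (fun pm mass => pm ++ [PySem.List.pyGetD pm (-1) 0 + mass]) [0]
      = (List.range (a.length+1)).map (fun k => (a.take k).sum) := by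
  induction a using List.reverseRecOn with
  | nil => simp
  | append_singleton a x ih =>
    have hlast : PySem.List.pyGetD ((List.range (a.length+1)).map (fun k => (a.take k).sum)) (-1) 0 = a.sum := by
      rw [List.range_succ, List.map_append, List.map_cons, List.map_nil,
        PySem.List.pyGetD_neg_one_append_singleton]
      simp
    have hkey : (List.range ((a ++ [x]).length+1)).map (fun k => ((a ++ [x]).take k).sum)
        = (List.range (a.length+1)).map (fun k => (a.take k).sum) ++ [a.sum + x] := by
      have h2 : (a ++ [x]).length + 1 = (a.length + 1) + 1 := by simp
      rw [h2, List.range_succ, List.map_append, List.map_cons, List.map_nil]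
      congr 1
      · apply List.map_congr_left
        intro k hk
        simp only [List.mem_range] at hk
        rw [List.take_append_of_le_length (by omega)]
      · simp [List.take_of_length_le]
    rw [List.foldl_append, ih, hkey]
    simp [hlast]

lemma pv_last (a : List Int) :
    PySem.List.pyGetD ((List.range (a.length+1)).map (fun k => (a.take k).sum)) (-1) 0 = a.sum := by
  rw [List.range_succ, List.map_append, List.map_cons, List.map_nil,
    PySem.List.pyGetD_neg_one_append_singleton]
  simp

lemma pv_get (a : List Int) (j : Int) (h0 : 0 ≤ j) (h1 : j ≤ (a.length : Int)) :
    PySem.List.pyGetD ((List.range (a.length+1)).map (fun k => (a.take k).sum)) j 0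
      = (a.take j.toNat).sum := by
  have hlen : j < (((List.range (a.length+1)).map (fun k => (a.take k).sum)).length : Int) := by
    simp; omega
  rw [PySem.List.pyGetD_eq_getElem _ _ h0 hlen]
  simp

lemma pvA_char (a : List Int) :
    cyclo_spectrum_ints a = PySem.List.sorted (pvLA a) (fun x => x) false := by
  simp only [cyclo_spectrum_ints, pv_prefix_char]
  congr 1
  rw [pvLA]
  rw [PySem.List.foldl_congr_mem (g := fun cs i =>
      cs ++ (PySem.List.pyRange (i+1) ((a.length : Int)+1) 1).flatMap (fun j =>
        if 0 < i ∧ j < (a.length : Int) then [pvW a i j, a.sum - pvW a i j] else [pvW a i j]))]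
  · exact PySem.List.foldl_append_eq_flatMap _ _ _
  · intro acc i hi
    rw [PySem.List.mem_pyRange_one] at hi
    rw [PySem.List.foldl_congr_mem (g := fun cs j =>
        cs ++ (if 0 < i ∧ j < (a.length : Int) then [pvW a i j, a.sum - pvW a i j] else [pvW a i j]))]
    · exact PySem.List.foldl_append_eq_flatMap _ _ _
    · intro acc2 j hj
      rw [PySem.List.mem_pyRange_one] at hj
      simp only [pv_last, pv_get a j (by omega) (by omega), pv_get a i (by omega) (by omega), pvW]
      split_ifs <;> simp [List.append_assoc]

lemma pv_sum_take_drop (a : List Int) (i m : Nat) :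
    ((a.drop i).take m).sum = (a.take (i+m)).sum - (a.take i).sum := by
  rw [List.take_add, List.sum_append]; ring


lemma pv_prediff_slice (xs : List Int) (i L : Int) (hi : 0 ≤ i) (hL : 0 ≤ L) :
    (xs.take (i+L).toNat).sum - (xs.take i.toNat).sum
      = (PySem.List.slice xs (some i) (some (i+L))).sum := by
  rw [PySem.List.slice_toNat _ hi (by omega),
    show (i+L).toNat - i.toNat = L.toNat from by omega, pv_sum_take_drop,
    show i.toNat + L.toNat = (i+L).toNat from by omega]

lemma pvB_char (a : List Int) :
    cyclo_spectrum_ints_alt a = PySem.List.sorted (pvLB a) (fun x => x) false := by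
  have hlen2 : ((a ++ a).length : Int) = (a.length : Int) + (a.length : Int) := by simp
  simp only [cyclo_spectrum_ints_alt, pv_prefix_char, pvLB]
  congr 1
  have htail : PySem.List.pyGetD ((List.range ((a ++ a).length+1)).map (fun k => ((a ++ a).take k).sum))
      ((a.length : Int)) 0 = a.sum := by
    rw [pv_get (a ++ a) (a.length : Int) (by positivity) (by simp)]
    simp
  rw [htail]
  rw [PySem.List.foldl_congr_mem (g := fun sp L =>
      sp ++ (PySem.List.pyRange 0 (a.length : Int) 1).map (fun i =>
        (PySem.List.slice (a ++ a) (some i) (some (i+L))).sum))]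
  · rw [PySem.List.foldl_append_eq_flatMap]
    split_ifs <;> simp
  · intro acc L hL
    rw [PySem.List.mem_pyRange_one] at hL
    rw [PySem.List.foldl_congr_mem (g := fun sp i =>
        sp ++ [(PySem.List.slice (a ++ a) (some i) (some (i+L))).sum])]
    · exact PySem.List.foldl_append_singleton_eq_map _ _ _
    · intro acc2 i hi
      rw [PySem.List.mem_pyRange_one] at hi
      rw [pv_get (a ++ a) (i+L) (by omega) (by omega),
        pv_get (a ++ a) i (by omega) (by omega),
        pv_prediff_slice (a ++ a) i L (by omega) (by omega)]

lemma pv_sum_drop (a : List Int) (i : Nat) :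
    (a.drop i).sum = a.sum - (a.take i).sum := by
  conv_lhs => rw [show a.drop i = a.drop i from rfl]
  have := List.take_append_drop i a
  have h2 : a.sum = (a.take i).sum + (a.drop i).sum := by
    conv_lhs => rw [← this]
    rw [List.sum_append]
  omega

lemma pv_v_eq (a : List Int) (i L : Int) (hi0 : 0 ≤ i) (hin : i < (a.length : Int))
    (hL1 : 1 ≤ L) (hLn : L < (a.length : Int)) :
    (PySem.List.slice (a ++ a) (some i) (some (i+L))).sum =
      if i + L ≤ (a.length : Int) then pvW a i (i+L)
      else a.sum - pvW a (i + L - (a.length : Int)) i := by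
  rw [PySem.List.slice_toNat _ hi0 (by omega)]
  have hm : (i+L).toNat - i.toNat = L.toNat := by omega
  rw [hm]
  rw [List.drop_append]
  have hd : a.drop (i.toNat - a.length) = a := by
    rw [show i.toNat - a.length = 0 from by omega, List.drop_zero]
  rw [hd, List.take_append, List.length_drop]
  split_ifs with h
  · -- nonwrap
    have h0 : L.toNat - (a.length - i.toNat) = 0 := by omega
    rw [h0, List.take_zero, List.append_nil,
      pv_sum_take_drop, pvW, show (i.toNat + L.toNat) = (i+L).toNat from by omega]
  · have hdt : (a.drop i.toNat).take L.toNat = a.drop i.toNat := by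
      apply List.take_of_length_le; simp; omega
    rw [hdt, List.sum_append, pv_sum_drop, pvW,
      show L.toNat - (a.length - i.toNat) = (i + L - (a.length:Int)).toNat from by omega]
    ring



lemma pv_coe_flatMap {α β : Type} (l : List β) (g : β → List α) :
    ((l.flatMap g : List α) : Multiset α) = (l.map (fun x => ((g x : List α) : Multiset α))).sum := by
  induction l with
  | nil => simp
  | cons x xs ih => rw [List.flatMap_cons, ← Multiset.coe_add, ih]; simp

lemma pv_sum_pyRange {M : Type} [AddCommMonoid M] (a b : Int) (f : Int → M) :
    ((PySem.List.pyRange a b 1).map f).sum = ∑ x ∈ Finset.Ico a b, f x := by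
  have hn : (PySem.List.pyRange a b 1).toFinset = Finset.Ico a b := by
    ext x
    simp [PySem.List.mem_pyRange_one]
  rw [← hn]
  exact (List.sum_toFinset f (PySem.List.nodup_pyRange_one a b)).symm

lemma pv_split_ite (c : Prop) [Decidable c] (x y : Int) :
    ((if c then [x, y] else [x] : List Int) : Multiset Int) = (↑([x] : List Int)) + (if c then (↑([y] : List Int)) else 0) := by
  split_ifs with h
  · simp
    rfl
  · simp

lemma pv_core (a : List Int) :
    (∑ i ∈ Finset.Ico (0:Int) (a.length:Int), ∑ j ∈ Finset.Ico (i+1) ((a.length:Int)+1),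
       ((if 0 < i ∧ j < (a.length:Int) then [pvW a i j, a.sum - pvW a i j] else [pvW a i j] : List Int) : Multiset Int))
    = (∑ L ∈ Finset.Ico (1:Int) (a.length:Int), ∑ i ∈ Finset.Ico (0:Int) (a.length:Int),
        (([(PySem.List.slice (a++a) (some i) (some (i+L))).sum] : List Int) : Multiset Int))
      + (if a ≠ [] then (([a.sum] : List Int) : Multiset Int) else 0) := by
  set n : Int := (a.length : Int) with hn
  have hn0 : 0 ≤ n := by positivity
  -- A side to product-over-triangle form
  have hA : (∑ i ∈ Finset.Ico (0:Int) n, ∑ j ∈ Finset.Ico (i+1) (n+1),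
       ((if 0 < i ∧ j < n then [pvW a i j, a.sum - pvW a i j] else [pvW a i j] : List Int) : Multiset Int))
      = ∑ q ∈ (Finset.Ico (0:Int) n ×ˢ Finset.Ico (0:Int) (n+1)).filter (fun q => q.1 < q.2),
          ((if 0 < q.1 ∧ q.2 < n then [pvW a q.1 q.2, a.sum - pvW a q.1 q.2] else [pvW a q.1 q.2] : List Int) : Multiset Int) := by
    rw [Finset.sum_filter,
      Finset.sum_product' (Finset.Ico (0:Int) n) (Finset.Ico (0:Int) (n+1))
        (fun i j => if i < j then ((if 0 < i ∧ j < n then [pvW a i j, a.sum - pvW a i j] else [pvW a i j] : List Int) : Multiset Int) else 0)]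
    apply Finset.sum_congr rfl
    intro i hi
    rw [Finset.mem_Ico] at hi
    have hIco : Finset.Ico (i+1) (n+1) = (Finset.Ico (0:Int) (n+1)).filter (fun j => i < j) := by
      ext j; simp only [Finset.mem_Ico, Finset.mem_filter]; omega
    rw [hIco, Finset.sum_filter]
  rw [hA]
  -- B side: compute each slice sum
  have hB : (∑ L ∈ Finset.Ico (1:Int) n, ∑ i ∈ Finset.Ico (0:Int) n,
        (([(PySem.List.slice (a++a) (some i) (some (i+L))).sum] : List Int) : Multiset Int))
      = ∑ p ∈ (Finset.Ico (1:Int) n ×ˢ Finset.Ico (0:Int) n),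
          (if p.2 + p.1 ≤ n then (↑([pvW a p.2 (p.2 + p.1)] : List Int) : Multiset Int)
           else (↑([a.sum - pvW a (p.2 + p.1 - n) p.2] : List Int) : Multiset Int)) := by
    rw [Finset.sum_product' (Finset.Ico (1:Int) n) (Finset.Ico (0:Int) n)
        (fun L i => if i + L ≤ n then (↑([pvW a i (i + L)] : List Int) : Multiset Int)
           else (↑([a.sum - pvW a (i + L - n) i] : List Int) : Multiset Int))]
    apply Finset.sum_congr rfl
    intro L hL
    apply Finset.sum_congr rfl
    intro i hi
    rw [Finset.mem_Ico] at hL hi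
    rw [pv_v_eq a i L hi.1 hi.2 hL.1 hL.2]
    rw [apply_ite (fun z => (↑([z] : List Int) : Multiset Int))]
  rw [hB, Finset.sum_ite]
  -- split A summand
  rw [Finset.sum_congr rfl (fun q _ => pv_split_ite _ _ _), Finset.sum_add_distrib]
  rw [← Finset.sum_filter (fun q : Int × Int => 0 < q.1 ∧ q.2 < n)
        (fun q => (↑([a.sum - pvW a q.1 q.2] : List Int) : Multiset Int))]
  rw [← Finset.sum_filter_add_sum_filter_not
        ((Finset.Ico (0:Int) n ×ˢ Finset.Ico (0:Int) (n+1)).filter (fun q => q.1 < q.2))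
        (fun q => q.2 - q.1 < n)
        (fun q => (↑([pvW a q.1 q.2] : List Int) : Multiset Int))]
  have h1 : (∑ q ∈ ((Finset.Ico (0:Int) n ×ˢ Finset.Ico (0:Int) (n+1)).filter (fun q => q.1 < q.2)).filter (fun q => q.2 - q.1 < n),
        (↑([pvW a q.1 q.2] : List Int) : Multiset Int))
      = ∑ p ∈ (Finset.Ico (1:Int) n ×ˢ Finset.Ico (0:Int) n).filter (fun p => p.2 + p.1 ≤ n),
        (↑([pvW a p.2 (p.2 + p.1)] : List Int) : Multiset Int) := by
    apply Finset.sum_nbij' (fun q => (q.2 - q.1, q.1)) (fun p => (p.2, p.2 + p.1))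
    · rintro ⟨x, y⟩ hq
      simp only [Finset.mem_filter, Finset.mem_product, Finset.mem_Ico] at hq ⊢
      omega
    · rintro ⟨x, y⟩ hp
      simp only [Finset.mem_filter, Finset.mem_product, Finset.mem_Ico] at hp ⊢
      omega
    · rintro ⟨x, y⟩ hq
      refine Prod.ext ?_ ?_ <;> (dsimp; try ring)
    · rintro ⟨x, y⟩ hp
      refine Prod.ext ?_ ?_ <;> (dsimp; try ring)
    · rintro ⟨x, y⟩ hq
      show (↑([pvW a x y] : List Int) : Multiset Int) = ↑([pvW a x (x + (y - x))] : List Int)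
      rw [show x + (y - x) = y from by ring]
  have h2 : (∑ q ∈ ((Finset.Ico (0:Int) n ×ˢ Finset.Ico (0:Int) (n+1)).filter (fun q => q.1 < q.2)).filter (fun q => 0 < q.1 ∧ q.2 < n),
        (↑([a.sum - pvW a q.1 q.2] : List Int) : Multiset Int))
      = ∑ p ∈ (Finset.Ico (1:Int) n ×ˢ Finset.Ico (0:Int) n).filter (fun p => ¬ p.2 + p.1 ≤ n),
        (↑([a.sum - pvW a (p.2 + p.1 - n) p.2] : List Int) : Multiset Int) := by
    apply Finset.sum_nbij' (fun q => (n - (q.2 - q.1), q.2)) (fun p => (p.2 + p.1 - n, p.2))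
    · rintro ⟨x, y⟩ hq
      simp only [Finset.mem_filter, Finset.mem_product, Finset.mem_Ico] at hq ⊢
      omega
    · rintro ⟨x, y⟩ hp
      simp only [Finset.mem_filter, Finset.mem_product, Finset.mem_Ico] at hp ⊢
      omega
    · rintro ⟨x, y⟩ hq
      refine Prod.ext ?_ ?_ <;> (dsimp; try ring)
    · rintro ⟨x, y⟩ hp
      refine Prod.ext ?_ ?_ <;> (dsimp; try ring)
    · rintro ⟨x, y⟩ hq
      show (↑([a.sum - pvW a x y] : List Int) : Multiset Int)
          = ↑([a.sum - pvW a (y + (n - (y - x)) - n) y] : List Int)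
      rw [show y + (n - (y - x)) - n = x from by ring]
  have h3 : (∑ q ∈ ((Finset.Ico (0:Int) n ×ˢ Finset.Ico (0:Int) (n+1)).filter (fun q => q.1 < q.2)).filter (fun q => ¬ q.2 - q.1 < n),
        (↑([pvW a q.1 q.2] : List Int) : Multiset Int))
      = (if a ≠ [] then (↑([a.sum] : List Int) : Multiset Int) else 0) := by
    by_cases ha : a = []
    · subst ha
      have h0 : n = 0 := by simp [hn]
      rw [h0]
      simp
    · have hge : 1 ≤ n := by
        have : a.length ≠ 0 := fun h => ha (List.length_eq_zero_iff.mp h)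
        omega
      have hfe : ((Finset.Ico (0:Int) n ×ˢ Finset.Ico (0:Int) (n+1)).filter (fun q => q.1 < q.2)).filter (fun q => ¬ q.2 - q.1 < n)
          = {((0:Int), n)} := by
        ext q
        simp only [Finset.mem_filter, Finset.mem_product, Finset.mem_Ico, Finset.mem_singleton, Prod.ext_iff]
        omega
      rw [hfe, Finset.sum_singleton, if_pos ha]
      congr 2
      rw [pvW, hn]
      simp
  rw [h1, h2, h3]
  abel

lemma pv_coe_map {α β : Type} (l : List β) (f : β → α) :
    ((l.map f : List α) : Multiset α) = (l.map (fun x => (↑([f x] : List α) : Multiset α))).sum := by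
  induction l with
  | nil => simp
  | cons x xs ih => rw [List.map_cons, List.map_cons, List.sum_cons, ← ih]; simp

lemma pv_perm (a : List Int) : (pvLA a).Perm (pvLB a) := by
  rw [← Multiset.coe_eq_coe, pvLA, pvLB]
  rw [← Multiset.coe_add, ← Multiset.coe_add, ← Multiset.coe_add]
  rw [pv_coe_flatMap, pv_sum_pyRange, pv_coe_flatMap, pv_sum_pyRange]
  rw [Finset.sum_congr rfl (fun i _ => by rw [pv_coe_flatMap, pv_sum_pyRange] :
    ∀ i ∈ Finset.Ico (0:Int) (a.length:Int),
      ((((PySem.List.pyRange (i+1) ((a.length : Int)+1) 1).flatMap (fun j =>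
        if 0 < i ∧ j < (a.length : Int) then [pvW a i j, a.sum - pvW a i j] else [pvW a i j]) : List Int)) : Multiset Int)
      = ∑ j ∈ Finset.Ico (i+1) ((a.length:Int)+1),
          ((if 0 < i ∧ j < (a.length:Int) then [pvW a i j, a.sum - pvW a i j] else [pvW a i j] : List Int) : Multiset Int))]
  rw [Finset.sum_congr rfl (fun L _ => by rw [pv_coe_map, pv_sum_pyRange] :
    ∀ L ∈ Finset.Ico (1:Int) (a.length:Int),
      ((((PySem.List.pyRange 0 (a.length : Int) 1).map (fun i =>
        (PySem.List.slice (a ++ a) (some i) (some (i+L))).sum) : List Int)) : Multiset Int)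
      = ∑ i ∈ Finset.Ico (0:Int) (a.length:Int),
          (([(PySem.List.slice (a ++ a) (some i) (some (i+L))).sum] : List Int) : Multiset Int))]
  rw [pv_core]
  have htail : ((if a ≠ [] then [a.sum] else [] : List Int) : Multiset Int)
      = (if a ≠ [] then (([a.sum] : List Int) : Multiset Int) else 0) := by
    split_ifs <;> simp
  rw [htail]
  abel


-- ===== VERDICT (by name: the statement is the Claim_ definition above) =====
theorem cyclo_spectrum_ints_spec : Claim_equal_cyclo_spectrum_ints := by
  intro a _
  unfold Spec_cyclo_spectrum_ints
  rw [pvA_char, pvB_char]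
  exact PySem.List.sorted_eq_sorted_of_perm _ _ _ (fun x y h => h) (pv_perm a)
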